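-- pv_equiv track=rewrite | github.com/cirosantilli/project-euler-solvers | solvers/454.py | F
-- ===== SOURCE A (Python) =====
-- import math
--
-- def build_spf(limit: int) -> list[int]:
--     """Smallest prime factor sieve (linear time)."""
--     spf = [0] * (limit + 1)
--     primes: list[int] = []
--     if limit >= 1:
--         spf[1] = 1
--     for i in range(2, limit + 1):
--         if spf[i] == 0:
--             spf[i] = i
--             primes.append(i)
--         for p in primes:
--             v = i * p
--             if v > limit:
--                 break
--             spf[v] = p
--             if p == spf[i]:
--                 break
--     return spf
--
-- def sum_floor_segment(x: int, lo: int, hi: int) -> int: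
--     """
--     Compute sum_{i=lo+1..hi} floor(x / i) in O(#distinct quotients) time
--     using quotient grouping.
--     """
--     if hi <= lo or x <= 0:
--         return 0
--
--     res = 0
--     i = lo + 1
--     while i <= hi:
--         q = x // i
--         if q == 0:
--             break
--         j = x // q  # largest index with the same quotient q
--         if j > hi:
--             j = hi
--         res += q * (j - i + 1)
--         i = j + 1
--     return res
--
-- def F(L: int) -> int:
--     """
--     Compute F(L) for the problem.
--     """
--     B = math.isqrt(L)
--     spf = build_spf(B)
--
--     total = 0
--     sum_floor = sum_floor_segment  # local binding for speed
--
--     for n in range(2, B + 1):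
--         # Factor n into DISTINCT prime factors using spf.
--         tmp = n
--         primes = []
--         last = 0
--         while tmp > 1:
--             p = spf[tmp]
--             tmp //= p
--             if p != last:
--                 primes.append(p)
--                 last = p
--
--         # Enumerate all squarefree divisors d of n with their Möbius value mu(d).
--         # For squarefree d, mu(d) = (-1)^(#primes in d).
--         divs = [1]
--         mus = [1]
--         for p in primes:
--             m = len(divs)
--             for i in range(m):
--                 divs.append(divs[i] * p)
--                 mus.append(-mus[i])
--
--         Ln = L // n  # used as x = (L//n)//d
--
--         # Contribution:
--         # For each squarefree d|n:
--         #   k = n/d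
--         #   x = floor(L/(n*d)) = (L//n)//d
--         #   add mu(d) * sum_{i=k+1..2k-1} floor(x/i)
--         # derived via Möbius inversion and a divisor-sum compression.
--         for idx in range(len(divs)):
--             d = divs[idx]
--             mu = mus[idx]
--
--             k = n // d
--             if k <= 1:
--                 continue
--
--             x = Ln // d
--             if x == 0:
--                 continue
--
--             total += mu * sum_floor(x, k, 2 * k - 1)
--
--     return total
-- ===== SOURCE B (Python) =====
-- import math
--
-- def build_spf(limit: int) -> list[int]:
--     """Smallest prime factor sieve (linear time) - shared infrastructure."""
--     spf = [0] * (limit + 1)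
--     primes: list[int] = []
--     if limit >= 1:
--         spf[1] = 1
--     for i in range(2, limit + 1):
--         if spf[i] == 0:
--             spf[i] = i
--             primes.append(i)
--         for p in primes:
--             v = i * p
--             if v > limit:
--                 break
--             spf[v] = p
--             if p == spf[i]:
--                 break
--     return spf
--
-- def sum_floor_range(x: int, lo: int, hi: int) -> int:
--     """sum_{i=lo+1..hi} x//i for 0 < x and 1 <= lo <= hi: either scan the
--     rows i directly, or count the lattice points (i, j) with lo < i <= hi
--     and i*j <= x by columns j (columns beyond x//(lo+1) are empty),
--     whichever loop is shorter."""
--     cols = x // (lo + 1)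
--     if cols < hi - lo:
--         return sum(min(hi, x // j) - lo for j in range(1, cols + 1))
--     return sum(x // i for i in range(lo + 1, hi + 1))
--
-- def F(L: int) -> int:
--     """Compute F(L): same SPF sieve, but squarefree divisors are built as
--     (divisor, mobius) pairs by a fold, and each segment sum of floor(x/i)
--     is computed by row scanning or column counting instead of quotient
--     grouping."""
--     B = math.isqrt(L)
--     spf = build_spf(B)
--     total = 0
--     for n in range(2, B + 1):
--         # distinct prime factors of n via the spf chain
--         tmp = n
--         primes = []
--         last = 0
--         while tmp > 1:
--             p = spf[tmp]
--             tmp //= p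
--             if p != last:
--                 primes.append(p)
--                 last = p
--         # squarefree divisors with their Mobius values, as pairs
--         dmu = [(1, 1)]
--         for p in primes:
--             dmu = dmu + [(d * p, -mu) for (d, mu) in dmu]
--         Ln = L // n
--         for d, mu in dmu:
--             k = n // d
--             x = Ln // d
--             if k > 1 and x > 0:
--                 total += mu * sum_floor_range(x, k, 2 * k - 1)
--     return total
-- ===== Notes on version B (the rewrite author's own statement) =====
-- stated objective: alternative
-- what changed: The quotient-grouping while-loop sum_floor_segment is replaced by a lattice-point helper that either scans the rows i directly or counts by columns j (sum of min(hi, x//j) - lo), and the parallel divs/mus lists with their index loop are replaced by one list of (divisor, mobius) pairs built by a fold and folded over directly.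
import Mathlib
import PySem

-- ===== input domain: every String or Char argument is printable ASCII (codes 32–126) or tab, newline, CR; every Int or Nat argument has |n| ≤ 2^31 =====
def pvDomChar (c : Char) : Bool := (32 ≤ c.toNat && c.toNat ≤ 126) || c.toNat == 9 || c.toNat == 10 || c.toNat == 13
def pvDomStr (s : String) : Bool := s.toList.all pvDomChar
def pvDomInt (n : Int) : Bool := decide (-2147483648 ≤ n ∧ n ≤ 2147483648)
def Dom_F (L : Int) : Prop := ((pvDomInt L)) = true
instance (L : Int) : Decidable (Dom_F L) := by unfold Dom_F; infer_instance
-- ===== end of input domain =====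

-- B keeps A's sieve but builds (divisor, mu) pairs by a fold and replaces the
-- quotient-grouping segment sum by row scanning / column counting of lattice points:
-- a different algorithm at comparable cost.

-- ===== PORT A =====

-- math.isqrt(L); exact for 0 ≤ L (Pre_F); isqrt raises ValueError for L < 0.
def intSqrt (L : Int) : Int := Int.ofNat (Nat.sqrt L.toNat)

-- inner 'for p in primes: v = i*p; if v > limit: break; spf[v] = p; if p == spf[i]: break'
def spfInner (limit i : Int) : List Int → List Int → List Int
  | [], spf => spf
  | p :: ps, spf =>
    if limit < i * p then spf
    else
      let spf' := PySem.List.pySetD spf (i * p) p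
      if p = PySem.List.pyGetD spf' i 0 then spf' else spfInner limit i ps spf'

-- build_spf, shared verbatim by A and B (Source B carries the identical helper)
def buildSpf (limit : Int) : List Int :=
  let spf0 : List Int := List.replicate (limit + 1).toNat 0
  let spf1 := if 1 ≤ limit then PySem.List.pySetD spf0 1 1 else spf0
  ((PySem.List.pyRange 2 (limit + 1) 1).foldl
    (fun (st : List Int × List Int) i =>
      let st' := if PySem.List.pyGetD st.1 i 0 = 0
                 then (PySem.List.pySetD st.1 i i, st.2 ++ [i]) else st
      (spfInner limit i st'.2 st'.1, st'.2))
    (spf1, [])).1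

-- 'while tmp > 1: p = spf[tmp]; tmp //= p; if p != last: primes.append(p); last = p'
-- fuel-bounded; fuel tmp.toNat suffices since each real step at least halves tmp.
-- shared verbatim by A and B.
def factorLoop (spf : List Int) : Nat → Int → Int → List Int → List Int
  | 0, _, _, primes => primes
  | fuel + 1, tmp, last, primes =>
    if 1 < tmp then
      let p := PySem.List.pyGetD spf tmp 0
      let tmp' := PySem.Int.floordiv tmp p
      if p ≠ last then factorLoop spf fuel tmp' p (primes ++ [p])
      else factorLoop spf fuel tmp' last primes
    else primes

-- 'for p in primes: m = len(divs); for i in range(m): divs.append(divs[i]*p); mus.append(-mus[i])'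
-- (the reads divs[i]/mus[i] with i < m see the original prefix, so they read the captured lists: exact)
def divmusA : List Int → List Int × List Int → List Int × List Int
  | [], dm => dm
  | p :: ps, (divs, mus) =>
    divmusA ps
      ((PySem.List.pyRange 0 (PySem.List.len divs) 1).foldl
        (fun (dm : List Int × List Int) i =>
          (dm.1 ++ [PySem.List.pyGetD divs i 0 * p], dm.2 ++ [-(PySem.List.pyGetD mus i 0)]))
        (divs, mus))

-- 'while i <= hi: q = x // i; if q == 0: break; j = min(x // q, hi); res += q*(j-i+1); i = j+1'
-- fuel-bounded: i strictly increases, so (hi - lo).toNat iterations suffice.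
def sfsLoop (x hi : Int) : Nat → Int → Int → Int
  | 0, _, res => res
  | fuel + 1, i, res =>
    if i ≤ hi then
      let q := PySem.Int.floordiv x i
      if q = 0 then res
      else
        let j0 := PySem.Int.floordiv x q
        let j := if hi < j0 then hi else j0
        sfsLoop x hi fuel (j + 1) (res + q * (j - i + 1))
    else res

def sumFloorSegment (x lo hi : Int) : Int :=
  if hi ≤ lo ∨ x ≤ 0 then 0
  else sfsLoop x hi (hi - lo).toNat (lo + 1) 0

def F (L : Int) : Int :=
  let B := intSqrt L
  let spf := buildSpf B
  (PySem.List.pyRange 2 (B + 1) 1).foldl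
    (fun total n =>
      let primes := factorLoop spf n.toNat n 0 []
      let dm := divmusA primes ([1], [1])
      let Ln := PySem.Int.floordiv L n
      (PySem.List.pyRange 0 (PySem.List.len dm.1) 1).foldl
        (fun total idx =>
          let d := PySem.List.pyGetD dm.1 idx 0
          let mu := PySem.List.pyGetD dm.2 idx 0
          let k := PySem.Int.floordiv n d
          if k ≤ 1 then total
          else
            let x := PySem.Int.floordiv Ln d
            if x = 0 then total
            else total + mu * sumFloorSegment x k (2 * k - 1))
        total)
    0

-- ===== PORT B =====

-- 'for p in primes: dmu = dmu + [(d*p, -mu) for (d, mu) in dmu]'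
def divmusB : List Int → List (Int × Int) → List (Int × Int)
  | [], dm => dm
  | p :: ps, dm => divmusB ps (dm ++ dm.map (fun q => (q.1 * p, -q.2)))

-- 'cols = x // (lo+1); if cols < hi-lo: sum(min(hi, x//j) - lo for j in range(1, cols+1))
--  else: sum(x // i for i in range(lo+1, hi+1))'
def sumFloorRange (x lo hi : Int) : Int :=
  let cols := PySem.Int.floordiv x (lo + 1)
  if cols < hi - lo then
    ((PySem.List.pyRange 1 (cols + 1) 1).map (fun j => min hi (PySem.Int.floordiv x j) - lo)).sum
  else
    ((PySem.List.pyRange (lo + 1) (hi + 1) 1).map (fun i => PySem.Int.floordiv x i)).sum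

def F_alt (L : Int) : Int :=
  let B := intSqrt L
  let spf := buildSpf B
  (PySem.List.pyRange 2 (B + 1) 1).foldl
    (fun total n =>
      let primes := factorLoop spf n.toNat n 0 []
      let dmu := divmusB primes [(1, 1)]
      let Ln := PySem.Int.floordiv L n
      dmu.foldl
        (fun total q =>
          let k := PySem.Int.floordiv n q.1
          let x := PySem.Int.floordiv Ln q.1
          if 1 < k ∧ 0 < x then
            total + q.2 * sumFloorRange x k (2 * k - 1)
          else total)
        total)
    0

-- ===== PRECONDITION & SPEC =====
-- Pre_F excludes only L < 0, where math.isqrt (hence A, and B alike) raises ValueError.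
def Pre_F (L : Int) : Prop := 0 ≤ L
instance (L : Int) : Decidable (Pre_F L) := by unfold Pre_F; infer_instance
def pvWitness_F : Int := 10

def Spec_F (L : Int) (out : Int) : Prop := out = F_alt L
instance (L : Int) (out : Int) : Decidable (Spec_F L out) := by unfold Spec_F; infer_instance

-- ===== CLAIM (what is proved, stated in full; the proofs are below) =====
def Claim_equal_F : Prop := ∀ (L : Int), Dom_F L → Pre_F L → Spec_F L (F L)

-- ===== LEMMAS AND PROOFS =====

theorem sfsLoop_eq (x hi : Int) (hx : 0 < x) :
    ∀ (fuel : Nat) (i res : Int), 0 < i → (hi + 1 - i).toNat ≤ fuel →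
      sfsLoop x hi fuel i res
        = res + ((PySem.List.pyRange i (hi + 1) 1).map (fun t => PySem.Int.floordiv x t)).sum := by
  intro fuel
  induction fuel with
  | zero =>
    intro i res hi0 hf
    rw [PySem.List.pyRange_one_eq_nil (by omega)]
    simp [sfsLoop]
  | succ fuel ih =>
    intro i res hi0 hf
    by_cases hih : i ≤ hi
    · have hq := (PySem.Int.floordiv_eq_iff_of_pos hi0 (a := x) (q := PySem.Int.floordiv x i)).mp rfl
      by_cases hq0 : PySem.Int.floordiv x i = 0
      · have hterm : ∀ t ∈ PySem.List.pyRange i (hi + 1) 1, PySem.Int.floordiv x t = 0 := by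
          intro t ht
          rw [PySem.List.mem_pyRange_one] at ht
          rw [PySem.Int.floordiv_eq_iff_of_pos (by omega)]
          rw [hq0] at hq
          constructor
          · nlinarith [hq.1]
          · nlinarith [hq.2, ht.1]
        have hsum : ((PySem.List.pyRange i (hi + 1) 1).map (fun t => PySem.Int.floordiv x t)).sum = 0 := by
          apply List.sum_eq_zero
          intro y hy
          obtain ⟨t, ht, rfl⟩ := List.mem_map.mp hy
          exact hterm t ht
        simp [sfsLoop, hih, hq0, hsum]
      · have hqpos : 0 < PySem.Int.floordiv x i := by
          have h0 : (0 : Int) ≤ PySem.Int.floordiv x i := by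
            rw [PySem.Int.le_floordiv_iff_mul_le hi0]; nlinarith
          omega
        set q := PySem.Int.floordiv x i with hqdef
        set j0 := PySem.Int.floordiv x q with hj0def
        set j : Int := if hi < j0 then hi else j0 with hjdef
        have hij0 : i ≤ j0 := by
          rw [hj0def, PySem.Int.le_floordiv_iff_mul_le hqpos]; nlinarith [hq.1]
        have hij : i ≤ j := by rw [hjdef]; split <;> omega
        have hjhi : j ≤ hi := by rw [hjdef]; split <;> omega
        have hjj0 : j ≤ j0 := by rw [hjdef]; split <;> omega
        have hconst : ∀ t ∈ PySem.List.pyRange i (j + 1) 1, PySem.Int.floordiv x t = q := by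
          intro t ht
          rw [PySem.List.mem_pyRange_one] at ht
          have htpos : 0 < t := by omega
          rw [PySem.Int.floordiv_eq_iff_of_pos htpos]
          have h1 : t * q ≤ x := (PySem.Int.le_floordiv_iff_mul_le hqpos (q := t)).mp (by omega)
          constructor
          · nlinarith
          · nlinarith [hq.2, ht.1]
        have hsplit := PySem.List.pyRange_one_append i (j + 1) (hi + 1) (by omega) (by omega)
        have hrec := ih (j + 1) (res + q * (j - i + 1)) (by omega) (by omega)
        simp only [sfsLoop, if_pos hih, if_neg hq0, ← hqdef, ← hj0def, ← hjdef]
        rw [hrec, hsplit, List.map_append, List.sum_append, List.map_congr_left hconst,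
          PySem.List.sum_map_const_int, PySem.List.length_pyRange_one]
        have hcast : ((j + 1 - i).toNat : Int) = j + 1 - i := by omega
        rw [hcast]; ring
    · rw [PySem.List.pyRange_one_eq_nil (by omega)]
      simp [sfsLoop, hih]

theorem sumFloorSegment_eq (x lo hi : Int) (hlo : 0 ≤ lo) :
    sumFloorSegment x lo hi
      = if 0 < x then ((PySem.List.pyRange (lo + 1) (hi + 1) 1).map
          (fun t => PySem.Int.floordiv x t)).sum else 0 := by
  unfold sumFloorSegment
  by_cases hx : 0 < x
  · rw [if_pos hx]
    by_cases hhl : hi ≤ lo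
    · rw [if_pos (Or.inl hhl), PySem.List.pyRange_one_eq_nil (by omega)]
      simp
    · rw [if_neg (by omega), sfsLoop_eq x hi hx (hi - lo).toNat (lo + 1) 0 (by omega) (by omega)]
      simp
  · rw [if_neg hx, if_pos (Or.inr (by omega))]

theorem foldl_pair_append (f g : Int → Int) :
    ∀ (is : List Int) (a b : List Int),
      is.foldl (fun (dm : List Int × List Int) i => (dm.1 ++ [f i], dm.2 ++ [g i])) (a, b)
        = (a ++ is.map f, b ++ is.map g) := by
  intro is
  induction is with
  | nil => simp
  | cons i is ih => intro a b; simp [List.foldl_cons, ih]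

theorem map_pyGetD_comp {α β : Type} (xs : List α) (d : α) (h : α → β) :
    (PySem.List.pyRange 0 (PySem.List.len xs) 1).map (fun i => h (PySem.List.pyGetD xs i d))
      = xs.map h := by
  conv_rhs => rw [← PySem.List.map_pyGetD_pyRange_zero xs d]
  rw [List.map_map]
  rfl

theorem divmus_eq : ∀ (ps : List Int) (dm : List (Int × Int)),
    divmusA ps (dm.map Prod.fst, dm.map Prod.snd)
      = ((divmusB ps dm).map Prod.fst, (divmusB ps dm).map Prod.snd) := by
  intro ps
  induction ps with
  | nil => intro dm; rfl
  | cons p ps ih =>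
    intro dm
    have h1 : ∀ i : Int, PySem.List.pyGetD (dm.map Prod.fst) i 0
        = (PySem.List.pyGetD dm i ((0 : Int), (0 : Int))).1 := fun i =>
      PySem.List.pyGetD_map Prod.fst dm i ((0 : Int), (0 : Int))
    have h2 : ∀ i : Int, PySem.List.pyGetD (dm.map Prod.snd) i 0
        = (PySem.List.pyGetD dm i ((0 : Int), (0 : Int))).2 := fun i =>
      PySem.List.pyGetD_map Prod.snd dm i ((0 : Int), (0 : Int))
    simp only [divmusA, divmusB, foldl_pair_append]
    rw [map_pyGetD_comp (dm.map Prod.fst) 0 (fun a => a * p)]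
    rw [show PySem.List.len (List.map Prod.fst dm) = PySem.List.len (List.map Prod.snd dm) from by
      simp [PySem.List.len]]
    rw [map_pyGetD_comp (dm.map Prod.snd) 0 (fun a => -a)]
    simpa [List.map_append, List.map_map, Function.comp] using ih (dm ++ dm.map (fun q => (q.1 * p, -q.2)))

theorem colSum_eq (x lo : Int) (hx : 0 < x) (hlo : 0 < lo) :
    ∀ (t : Nat),
      ((PySem.List.pyRange 1 (PySem.Int.floordiv x (lo + 1) + 1) 1).map
          (fun j => min (lo + (t : Int)) (PySem.Int.floordiv x j) - lo)).sum
        = ((PySem.List.pyRange (lo + 1) (lo + (t : Int) + 1) 1).map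
            (fun i => PySem.Int.floordiv x i)).sum := by
  have hc0 : (0 : Int) ≤ PySem.Int.floordiv x (lo + 1) := by
    rw [PySem.Int.le_floordiv_iff_mul_le (by omega)]; nlinarith
  have hcol : ∀ j : Int, 0 < j → (j ≤ PySem.Int.floordiv x (lo + 1) ↔ lo + 1 ≤ PySem.Int.floordiv x j) := by
    intro j hj
    rw [PySem.Int.le_floordiv_iff_mul_le (b := lo + 1) (by omega),
      PySem.Int.le_floordiv_iff_mul_le (b := j) hj]
    constructor <;> intro h <;> nlinarith
  intro t
  induction t with
  | zero =>
    rw [PySem.List.pyRange_one_eq_nil (a := lo + 1) (by push_cast; omega)]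
    simp only [List.map_nil, List.sum_nil]
    apply List.sum_eq_zero
    intro y hy
    obtain ⟨j, hj, rfl⟩ := List.mem_map.mp hy
    rw [PySem.List.mem_pyRange_one] at hj
    have hjx := (hcol j (by omega)).mp (by omega)
    have : min (lo + ((0 : Nat) : Int)) (PySem.Int.floordiv x j) = lo := by
      push_cast; omega
    rw [this]; ring
  | succ t ih =>
    have hhi : (0 : Int) < lo + t + 1 := by omega
    set c0 := PySem.Int.floordiv x (lo + 1) with hc0def
    set d := PySem.Int.floordiv x (lo + t + 1) with hd
    have hdx := (PySem.Int.floordiv_eq_iff_of_pos hhi (a := x) (q := d)).mp rfl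
    have hd0 : 0 ≤ d := by
      rw [hd, PySem.Int.le_floordiv_iff_mul_le hhi]; nlinarith
    have hdc : d ≤ c0 := by
      rw [hc0def, PySem.Int.le_floordiv_iff_mul_le (by omega)]; nlinarith [hdx.1]
    have hhead : ∀ j ∈ PySem.List.pyRange 1 (d + 1) 1, lo + t + 1 ≤ PySem.Int.floordiv x j := by
      intro j hj
      rw [PySem.List.mem_pyRange_one] at hj
      rw [PySem.Int.le_floordiv_iff_mul_le (by omega)]
      have : j * (lo + t + 1) ≤ x :=
        (PySem.Int.le_floordiv_iff_mul_le (b := lo + t + 1) hhi).mp (by omega)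
      nlinarith
    have htail : ∀ j ∈ PySem.List.pyRange (d + 1) (c0 + 1) 1, PySem.Int.floordiv x j ≤ lo + t := by
      intro j hj
      rw [PySem.List.mem_pyRange_one] at hj
      by_contra hcon
      have h2 : (lo + t + 1) * j ≤ x :=
        (PySem.Int.le_floordiv_iff_mul_le (b := j) (by omega)).mp (by omega)
      have h3 : j ≤ d := by
        rw [hd, PySem.Int.le_floordiv_iff_mul_le hhi]; nlinarith
      omega
    have hsplit := PySem.List.pyRange_one_append 1 (d + 1) (c0 + 1) (by omega) (by omega)
    have hcast : ((d + 1 - 1).toNat : Int) = d := by omega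
    have key : ∀ m : Int, (∀ j ∈ PySem.List.pyRange 1 (d + 1) 1,
          min m (PySem.Int.floordiv x j) - lo = m - lo) →
        ((PySem.List.pyRange 1 (c0 + 1) 1).map
            (fun j => min m (PySem.Int.floordiv x j) - lo)).sum
          = d * (m - lo)
            + ((PySem.List.pyRange (d + 1) (c0 + 1) 1).map
                (fun j => min m (PySem.Int.floordiv x j) - lo)).sum := by
      intro m hm
      rw [hsplit, List.map_append, List.sum_append, List.map_congr_left hm,
        PySem.List.sum_map_const_int, PySem.List.length_pyRange_one, hcast]
    have k1 := key (lo + ((t + 1 : Nat) : Int)) (fun j hj => by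
      have := hhead j hj; push_cast; omega)
    have k2 := key (lo + (t : Int)) (fun j hj => by
      have := hhead j hj; omega)
    have ktail : ((PySem.List.pyRange (d + 1) (c0 + 1) 1).map
          (fun j => min (lo + ((t + 1 : Nat) : Int)) (PySem.Int.floordiv x j) - lo)).sum
        = ((PySem.List.pyRange (d + 1) (c0 + 1) 1).map
            (fun j => min (lo + (t : Int)) (PySem.Int.floordiv x j) - lo)).sum := by
      apply congrArg
      apply List.map_congr_left
      intro j hj
      have := htail j hj
      push_cast; omega
    have hrhs : PySem.List.pyRange (lo + 1) (lo + ((t + 1 : Nat) : Int) + 1) 1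
        = PySem.List.pyRange (lo + 1) (lo + (t : Int) + 1) 1 ++ [lo + (t : Int) + 1] := by
      push_cast
      have := PySem.List.pyRange_one_succ_right (a := lo + 1) (b := lo + t + 1) (by omega)
      rw [show lo + t + 1 + 1 = lo + (t + 1) + 1 from by ring] at this
      rw [show lo + (t + 1 : Int) + 1 = lo + (t + 1) + 1 from by ring, this]
    rw [k1, ktail, hrhs, List.map_append, List.sum_append, ← ih, k2]
    simp only [List.map_cons, List.map_nil, List.sum_cons, List.sum_nil]
    rw [show lo + (t : Int) + 1 = lo + t + 1 from by ring, ← hd]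
    push_cast
    ring

-- the wrapper: both branches of sumFloorRange compute the plain range sum
theorem sumFloorRange_eq (x lo hi : Int) (hx : 0 < x) (hlo : 0 < lo) (hhi : lo ≤ hi) :
    sumFloorRange x lo hi
      = ((PySem.List.pyRange (lo + 1) (hi + 1) 1).map (fun i => PySem.Int.floordiv x i)).sum := by
  unfold sumFloorRange
  by_cases hb : PySem.Int.floordiv x (lo + 1) < hi - lo
  · rw [if_pos hb]
    have := colSum_eq x lo hx hlo (hi - lo).toNat
    rw [show lo + (((hi - lo).toNat : Nat) : Int) = hi from by omega] at this
    exact this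
  · rw [if_neg hb]

theorem inner_eq (n Ln total : Int) (primes : List Int) :
    (PySem.List.pyRange 0 (PySem.List.len (divmusA primes ([1], [1])).1) 1).foldl
      (fun total idx =>
        if PySem.Int.floordiv n (PySem.List.pyGetD (divmusA primes ([1], [1])).1 idx 0) ≤ 1 then total
        else
          if PySem.Int.floordiv Ln (PySem.List.pyGetD (divmusA primes ([1], [1])).1 idx 0) = 0 then total
          else total + PySem.List.pyGetD (divmusA primes ([1], [1])).2 idx 0 *
            sumFloorSegment (PySem.Int.floordiv Ln (PySem.List.pyGetD (divmusA primes ([1], [1])).1 idx 0))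
              (PySem.Int.floordiv n (PySem.List.pyGetD (divmusA primes ([1], [1])).1 idx 0))
              (2 * PySem.Int.floordiv n (PySem.List.pyGetD (divmusA primes ([1], [1])).1 idx 0) - 1)) total
    = (divmusB primes [(1, 1)]).foldl
      (fun total q =>
        if 1 < PySem.Int.floordiv n q.1 ∧ 0 < PySem.Int.floordiv Ln q.1 then
          total + q.2 * sumFloorRange (PySem.Int.floordiv Ln q.1) (PySem.Int.floordiv n q.1)
            (2 * PySem.Int.floordiv n q.1 - 1)
        else total) total := by
  have hdm : divmusA primes ([1], [1])
      = ((divmusB primes [(1, 1)]).map Prod.fst, (divmusB primes [(1, 1)]).map Prod.snd) := by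
    simpa using divmus_eq primes [(1, 1)]
  rw [hdm]
  simp only [show ∀ i : Int, PySem.List.pyGetD ((divmusB primes [(1, 1)]).map Prod.fst) i 0
      = (PySem.List.pyGetD (divmusB primes [(1, 1)]) i ((0 : Int), (0 : Int))).1 from fun i =>
      PySem.List.pyGetD_map Prod.fst (divmusB primes [(1, 1)]) i ((0 : Int), (0 : Int)),
    show ∀ i : Int, PySem.List.pyGetD ((divmusB primes [(1, 1)]).map Prod.snd) i 0
      = (PySem.List.pyGetD (divmusB primes [(1, 1)]) i ((0 : Int), (0 : Int))).2 from fun i =>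
      PySem.List.pyGetD_map Prod.snd (divmusB primes [(1, 1)]) i ((0 : Int), (0 : Int)),
    show PySem.List.len ((divmusB primes [(1, 1)]).map Prod.fst)
      = PySem.List.len (divmusB primes [(1, 1)]) from by simp [PySem.List.len]]
  rw [PySem.List.foldl_pyRange_zero_pyGetD (divmusB primes [(1, 1)]) ((0 : Int), (0 : Int))
    (fun total q =>
      if PySem.Int.floordiv n q.1 ≤ 1 then total
      else
        if PySem.Int.floordiv Ln q.1 = 0 then total
        else total + q.2 * sumFloorSegment (PySem.Int.floordiv Ln q.1) (PySem.Int.floordiv n q.1)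
          (2 * PySem.Int.floordiv n q.1 - 1)) total]
  apply PySem.List.foldl_congr_mem
  intro acc q _
  by_cases hk : PySem.Int.floordiv n q.1 ≤ 1
  · rw [if_pos hk, if_neg (fun h => absurd h.1 (by omega))]
  · rw [if_neg hk, sumFloorSegment_eq _ _ _ (by omega)]
    by_cases hx : PySem.Int.floordiv Ln q.1 = 0
    · rw [if_pos hx, if_neg (fun h => absurd h.2 (by omega))]
    · rw [if_neg hx]
      by_cases hxp : 0 < PySem.Int.floordiv Ln q.1
      · rw [if_pos hxp, if_pos ⟨by omega, hxp⟩,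
          sumFloorRange_eq _ _ _ hxp (by omega) (by omega)]
      · rw [if_neg hxp, if_neg (fun h => absurd h.2 hxp)]
        ring

-- ===== VERDICT (by name: the statement is the Claim_ definition above) =====
theorem F_spec : Claim_equal_F := by
  intro L hD hP
  show F L = F_alt L
  unfold F F_alt
  apply PySem.List.foldl_congr_mem
  intro total n _
  exact inner_eq n (PySem.Int.floordiv L n) total
    (factorLoop (buildSpf (intSqrt L)) n.toNat n 0 [])
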